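-- pv_equiv track=rewrite | github.com/DonaldDai/clm_code | Scripts/mmpdbFrag.py | index_var
-- ===== SOURCE A (Python) =====
-- def index_var(varSmi):
--     count=0
--     newVarSmi=''
--     for idx,ichar in enumerate(varSmi):
--         if ichar=='*':
--             count+=1
--             ichar=f"[*:{count}]"
--         newVarSmi+=ichar
--     return newVarSmi
-- ===== SOURCE B (Python) =====
-- def index_var(varSmi):
--     parts = varSmi.split('*')
--     out = parts[0]
--     for i, seg in enumerate(parts[1:], 1):
--         out += f"[*:{i}]" + seg
--     return out
-- ===== Notes on version B (the rewrite author's own statement) =====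
-- stated objective: faster
-- what changed: B splits the string on the asterisk separator once and stitches the segments back with indexed labels, instead of scanning every character and growing the result by one-character += concatenations.
import Mathlib
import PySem

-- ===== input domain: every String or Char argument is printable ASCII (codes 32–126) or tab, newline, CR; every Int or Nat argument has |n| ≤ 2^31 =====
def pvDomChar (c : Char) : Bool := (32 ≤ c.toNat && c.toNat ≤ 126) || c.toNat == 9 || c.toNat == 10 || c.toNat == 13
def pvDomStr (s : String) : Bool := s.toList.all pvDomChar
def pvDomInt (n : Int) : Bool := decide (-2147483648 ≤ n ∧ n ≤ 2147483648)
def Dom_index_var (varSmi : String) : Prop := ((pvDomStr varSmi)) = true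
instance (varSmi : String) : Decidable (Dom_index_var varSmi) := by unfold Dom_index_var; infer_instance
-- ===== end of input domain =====

-- B splits the string on '*' once and stitches segments back with indexed labels instead of a per-character scan; objective: simpler.


-- ===== PORT A =====
-- literal port of A: one pass over the characters, a counter and a growing output string
def stepA (st : Int × List Char) (ichar : Char) : Int × List Char :=
  if ichar = '*' then
    (st.1 + 1, st.2 ++ ('[' :: '*' :: ':' :: (PySem.Int.toChars (st.1 + 1) ++ [']'])))
  else
    (st.1, st.2 ++ [ichar])

def index_var (varSmi : String) : String :=
  String.ofList (varSmi.toList.foldl stepA (0, [])).2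

-- ===== PORT B =====
-- hand port of Python's str.split('*') (nonempty one-char separator): exact — ''.split('*') = [''],
-- a separator at either end or two adjacent separators yield empty segments, as in CPython.
def splitStar : List Char → List (List Char)
  | [] => [[]]
  | c :: cs =>
      if c = '*' then [] :: splitStar cs
      else
        match splitStar cs with
        | p :: ps => (c :: p) :: ps
        | [] => [[c]]

def stepB (st : Int × List Char) (seg : List Char) : Int × List Char :=
  (st.1 + 1, st.2 ++ ('[' :: '*' :: ':' :: (PySem.Int.toChars st.1 ++ [']'])) ++ seg)

def index_var_alt (varSmi : String) : String :=
  let parts := splitStar varSmi.toList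
  String.ofList (parts.tail.foldl stepB (1, parts.headD [])).2

-- ===== PRECONDITION & SPEC =====
def Spec_index_var (varSmi : String) (out : String) : Prop := out = index_var_alt varSmi
instance (varSmi : String) (out : String) : Decidable (Spec_index_var varSmi out) := by unfold Spec_index_var; infer_instance

-- ===== CLAIM (what is proved, stated in full; the proofs are below) =====
def Claim_equal_index_var : Prop := ∀ (varSmi : String), Dom_index_var varSmi → Spec_index_var varSmi (index_var varSmi)

-- ===== LEMMAS AND PROOFS =====
theorem splitStar_ne_nil (cs : List Char) : splitStar cs ≠ [] := by
  cases cs with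
  | nil => simp [splitStar]
  | cons c cs =>
      simp only [splitStar]
      split
      · simp
      · cases h : splitStar cs <;> simp

theorem main_lemma (cs : List Char) : ∀ (count : Int) (acc : List Char),
    (cs.foldl stepA (count, acc)).2 =
    ((splitStar cs).tail.foldl stepB (count + 1, acc ++ (splitStar cs).headD [])).2 := by
  induction cs with
  | nil => intro count acc; simp [splitStar]
  | cons c cs ih =>
      intro count acc
      by_cases hc : c = '*'
      · subst hc
        simp only [splitStar, List.foldl_cons, stepA, reduceIte]
        rw [ih (count + 1) (acc ++ ('[' :: '*' :: ':' :: (PySem.Int.toChars (count + 1) ++ [']'])))]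
        obtain ⟨p, ps, hps⟩ : ∃ p ps, splitStar cs = p :: ps := by
          cases h : splitStar cs with
          | nil => exact absurd h (splitStar_ne_nil cs)
          | cons p ps => exact ⟨p, ps, rfl⟩
        simp [hps, stepB, List.append_assoc]
      · obtain ⟨p, ps, hps⟩ : ∃ p ps, splitStar cs = p :: ps := by
          cases h : splitStar cs with
          | nil => exact absurd h (splitStar_ne_nil cs)
          | cons p ps => exact ⟨p, ps, rfl⟩
        simp only [splitStar, if_neg hc, hps, List.foldl_cons, stepA]
        rw [ih count (acc ++ [c])]
        simp [hps]

-- ===== VERDICT (by name: the statement is the Claim_ definition above) =====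
theorem index_var_spec : Claim_equal_index_var := by
  intro varSmi _
  unfold Spec_index_var index_var index_var_alt
  rw [main_lemma varSmi.toList 0 []]
  simp
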